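-- pv_equiv track=rewrite | github.com/tycyd/codeforces | google/foobar/bringing_a_gun_to_a_trainer_fight.py | generate_dist_vector
-- ===== SOURCE A (Python) =====
-- def generate_dist_vector(size, start, tot_length, length):
--     tmp = [start]
--     count = 0
--     l, r = -length, tot_length - length
--     for i in range(size):
--         left = tmp[0]
--         right = tmp[count]
--         left += (l * 2)
--         right += (r * 2)
--         l, r = -r, -l
--         tmp = [left] + tmp + [right]
--         count += 2
--     return tmp
-- ===== SOURCE B (Python) =====
-- def generate_dist_vector(size, start, tot_length, length):
--     # closed-form: k-th left/right endpoint via cumulative sum of the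
--     # alternating reflection offsets; builds the list once, O(size).
--     n = max(size, 0)
--     l0, r0 = -length, tot_length - length
--
--     def cum(a, b, k):
--         # sum of the first k terms of the alternating sequence a, b, a, b, ...
--         return (k // 2) * (a + b) + (k % 2) * a
--
--     lefts = [start + 2 * cum(l0, -r0, k) for k in range(n, 0, -1)]
--     rights = [start + 2 * cum(r0, -l0, k) for k in range(1, n + 1)]
--     return lefts + [start] + rights
-- ===== Notes on version B (the rewrite author's own statement) =====
-- stated objective: faster
-- what changed: Replaces A's loop that rebuilds the list by concatenation each iteration (O(size^2)) with a closed-form cumulative sum of the alternating reflection offsets, building the left/right endpoint lists once in O(size).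
import Mathlib
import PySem

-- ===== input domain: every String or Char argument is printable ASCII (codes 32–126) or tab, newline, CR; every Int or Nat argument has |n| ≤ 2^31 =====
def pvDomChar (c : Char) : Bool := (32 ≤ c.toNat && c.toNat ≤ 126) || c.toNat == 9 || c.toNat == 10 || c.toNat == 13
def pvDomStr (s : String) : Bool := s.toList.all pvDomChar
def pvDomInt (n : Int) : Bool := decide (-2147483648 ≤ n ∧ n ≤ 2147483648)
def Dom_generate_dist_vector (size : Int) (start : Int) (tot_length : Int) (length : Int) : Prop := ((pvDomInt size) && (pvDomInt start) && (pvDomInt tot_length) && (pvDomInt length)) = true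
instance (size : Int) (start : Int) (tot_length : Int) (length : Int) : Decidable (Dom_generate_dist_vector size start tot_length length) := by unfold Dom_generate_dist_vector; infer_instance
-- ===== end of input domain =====

-- B replaces A's O(size^2) repeated list concatenation by a closed-form cumulative
-- sum of the alternating offsets, building the result list once (objective: faster).

-- ===== PORT A =====
-- the for-loop of A: state (tmp, count, l, r); tmp[0]/tmp[count] via pyGet?
-- (the `_ , _ => tmp` branch only makes the match total; both indices are always in range)
def aLoop (fuel : Nat) (tmp : List Int) (count l r : Int) : List Int :=
  match fuel with
  | 0 => tmp
  | Nat.succ n =>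
    match PySem.List.pyGet? tmp 0, PySem.List.pyGet? tmp count with
    | some left, some right =>
        aLoop n ([left + l * 2] ++ tmp ++ [right + r * 2]) (count + 2) (-r) (-l)
    | _, _ => tmp

def generate_dist_vector (size : Int) (start : Int) (tot_length : Int) (length : Int) : List Int :=
  aLoop size.toNat [start] 0 (-length) (tot_length - length)

-- ===== PORT B =====
-- sum of the first k terms of the alternating sequence a, b, a, b, …
def bCum (a b k : Int) : Int :=
  PySem.Int.floordiv k 2 * (a + b) + PySem.Int.mod k 2 * a

def generate_dist_vector_alt (size : Int) (start : Int) (tot_length : Int) (length : Int) : List Int :=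
  let n := max size 0
  let l0 := -length
  let r0 := tot_length - length
  let lefts := (PySem.List.pyRange n 0 (-1)).map (fun k => start + 2 * bCum l0 (-r0) k)
  let rights := (PySem.List.pyRange 1 (n + 1) 1).map (fun k => start + 2 * bCum r0 (-l0) k)
  lefts ++ [start] ++ rights

-- ===== PRECONDITION & SPEC =====
def Spec_generate_dist_vector (size : Int) (start : Int) (tot_length : Int) (length : Int) (out : List Int) : Prop := out = generate_dist_vector_alt size start tot_length length
instance (size : Int) (start : Int) (tot_length : Int) (length : Int) (out : List Int) : Decidable (Spec_generate_dist_vector size start tot_length length out) := by unfold Spec_generate_dist_vector; infer_instance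

-- ===== CLAIM (what is proved, stated in full; the proofs are below) =====
def Claim_equal_generate_dist_vector : Prop := ∀ (size : Int) (start : Int) (tot_length : Int) (length : Int), Dom_generate_dist_vector size start tot_length length → Spec_generate_dist_vector size start tot_length length (generate_dist_vector size start tot_length length)

-- ===== LEMMAS AND PROOFS =====

-- k-th term of the alternating sequence a, b, a, b, …
def altv (a b : Int) (k : Nat) : Int := if k % 2 = 0 then a else b

-- sum of the first k terms of the alternating sequence
def cumN (a b : Int) : Nat → Int
  | 0 => 0
  | Nat.succ k => cumN a b k + altv a b k

-- k-th left / right endpoint produced by A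
def Lf (start l0 r0 : Int) (k : Nat) : Int := start + 2 * cumN l0 (-r0) k
def Rf (start l0 r0 : Int) (k : Nat) : Int := start + 2 * cumN r0 (-l0) k

-- A's list after k iterations: [L_k, …, L_1, start, R_1, …, R_k]
def Tl (start l0 r0 : Int) (k : Nat) : List Int :=
  ((List.range k).map (fun i => Lf start l0 r0 (k - i))) ++ [start] ++
    ((List.range k).map (fun i => Rf start l0 r0 (i + 1)))

lemma altv_neg (a b : Int) (k : Nat) : -(altv a b k) = altv (-b) (-a) (k + 1) := by
  rcases Nat.mod_two_eq_zero_or_one k with h | h <;>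
    simp [altv, h, Nat.add_mod]

lemma Lf_succ (s a b : Int) (k : Nat) :
    Lf s a b (k + 1) = Lf s a b k + altv a (-b) k * 2 := by
  simp [Lf, cumN]; ring

lemma Rf_succ (s a b : Int) (k : Nat) :
    Rf s a b (k + 1) = Rf s a b k + altv b (-a) k * 2 := by
  simp [Rf, cumN]; ring

lemma Tl_succ (s a b : Int) (k : Nat) :
    Tl s a b (k + 1) = [Lf s a b (k + 1)] ++ Tl s a b k ++ [Rf s a b (k + 1)] := by
  have hl : (List.range (k + 1)).map (fun i => Lf s a b (k + 1 - i)) =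
      Lf s a b (k + 1) :: (List.range k).map (fun i => Lf s a b (k - i)) := by
    rw [List.range_succ_eq_map]
    simp [Function.comp_def]
  have hr : (List.range (k + 1)).map (fun i => Rf s a b (i + 1)) =
      (List.range k).map (fun i => Rf s a b (i + 1)) ++ [Rf s a b (k + 1)] := by
    rw [List.range_succ]
    simp
  simp only [Tl, hl, hr]
  simp

lemma Tl_head (s a b : Int) (k : Nat) :
    PySem.List.pyGet? (Tl s a b k) 0 = some (Lf s a b k) := by
  cases k with
  | zero => simp [Tl, Lf, cumN]
  | succ k =>
    rw [Tl_succ]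
    simp [PySem.List.pyGet?_zero_cons]

lemma Tl_last (s a b : Int) (k : Nat) :
    PySem.List.pyGet? (Tl s a b k) (2 * (k : Int)) = some (Rf s a b k) := by
  cases k with
  | zero => simp [Tl, Rf, cumN]
  | succ k =>
    rw [Tl_succ]
    have hpre : ([Lf s a b (k + 1)] ++ Tl s a b k ++ [Rf s a b (k + 1)]) =
        (([Lf s a b (k + 1)] ++ Tl s a b k) ++ (Rf s a b (k + 1)) :: []) := by simp
    rw [hpre]
    have hlen : (([Lf s a b (k + 1)] ++ Tl s a b k).length : Int) = 2 * ((k : Int) + 1) := by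
      simp [Tl]
      ring
    rw [show (2 * ((k : Nat).succ : Int)) = (([Lf s a b (k + 1)] ++ Tl s a b k).length : Int) by
      rw [hlen]; push_cast; ring]
    exact PySem.List.pyGet?_append_length _ _ _

lemma aLoop_succ_eq (n : Nat) (tmp : List Int) (count l r x y : Int)
    (hx : PySem.List.pyGet? tmp 0 = some x) (hy : PySem.List.pyGet? tmp count = some y) :
    aLoop (n + 1) tmp count l r =
      aLoop n ([x + l * 2] ++ tmp ++ [y + r * 2]) (count + 2) (-r) (-l) := by
  rw [aLoop, hx, hy]

lemma aLoop_inv (s a b : Int) (n : Nat) : ∀ (k : Nat),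
    aLoop n (Tl s a b k) (2 * (k : Int)) (altv a (-b) k) (altv b (-a) k) = Tl s a b (k + n) := by
  induction n with
  | zero => intro k; simp [aLoop]
  | succ n ih =>
    intro k
    rw [aLoop_succ_eq n _ _ _ _ _ _ (Tl_head s a b k) (Tl_last s a b k)]
    have h1 : Lf s a b k + altv a (-b) k * 2 = Lf s a b (k + 1) := (Lf_succ s a b k).symm
    have h2 : Rf s a b k + altv b (-a) k * 2 = Rf s a b (k + 1) := (Rf_succ s a b k).symm
    have h3 : -(altv b (-a) k) = altv a (-b) (k + 1) := by
      have := altv_neg b (-a) k; simpa using this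
    have h4 : -(altv a (-b) k) = altv b (-a) (k + 1) := by
      have := altv_neg a (-b) k; simpa using this
    rw [h1, h2, h3, h4, ← Tl_succ]
    have h5 : 2 * (k : Int) + 2 = 2 * ((k + 1 : Nat) : Int) := by push_cast; ring
    rw [h5, ih (k + 1)]
    congr 1
    omega

lemma A_eq_Tl (size start tot_length length : Int) :
    generate_dist_vector size start tot_length length =
      Tl start (-length) (tot_length - length) size.toNat := by
  unfold generate_dist_vector
  have h := aLoop_inv start (-length) (tot_length - length) size.toNat 0
  simpa [Tl, altv] using h

lemma cumN_closed (a b : Int) (k : Nat) :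
    cumN a b k = ((k / 2 : Nat) : Int) * (a + b) + ((k % 2 : Nat) : Int) * a := by
  induction k with
  | zero => simp [cumN]
  | succ k ih =>
    rcases Nat.mod_two_eq_zero_or_one k with h | h
    · have h1 : (k + 1) / 2 = k / 2 := by omega
      have h2 : (k + 1) % 2 = 1 := by omega
      simp [cumN, altv, h, h1, h2, ih]
    · have h1 : (k + 1) / 2 = k / 2 + 1 := by omega
      have h2 : (k + 1) % 2 = 0 := by omega
      simp [cumN, altv, h, h1, h2, ih]
      ring

lemma bCum_natCast (a b : Int) (k : Nat) : bCum a b (k : Int) = cumN a b k := by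
  rw [cumN_closed]
  unfold bCum
  rw [PySem.Int.floordiv_eq_ediv_of_pos (by omega), PySem.Int.mod_eq_emod_of_pos (by omega)]
  push_cast
  ring

lemma B_eq_Tl (size start tot_length length : Int) :
    generate_dist_vector_alt size start tot_length length =
      Tl start (-length) (tot_length - length) size.toNat := by
  unfold generate_dist_vector_alt
  dsimp only
  unfold Tl
  have hn : max size 0 = ((size.toNat : Nat) : Int) := by omega
  rw [hn, PySem.List.pyRange_neg_one, PySem.List.pyRange_one]
  have hm0 : (((size.toNat : Int)) - 0).toNat = size.toNat := by omega
  have hm1 : (((size.toNat : Int)) + 1 - 1).toNat = size.toNat := by omega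
  rw [hm0, hm1]
  simp only [List.map_map]
  congr 1
  · congr 1
    apply List.map_congr_left
    intro i hi
    have him : i < size.toNat := List.mem_range.mp hi
    have hc : ((size.toNat : Int)) - (i : Int) = ((size.toNat - i : Nat) : Int) := by omega
    simp only [Function.comp_def, hc, bCum_natCast, Lf]
  · apply List.map_congr_left
    intro i _
    have hc : (1 : Int) + (i : Int) = (((i + 1 : Nat)) : Int) := by omega
    simp only [Function.comp_def, hc, bCum_natCast, Rf]

-- ===== VERDICT (by name: the statement is the Claim_ definition above) =====
theorem generate_dist_vector_spec : Claim_equal_generate_dist_vector := by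
  intro size start tot_length length _
  unfold Spec_generate_dist_vector
  rw [A_eq_Tl, B_eq_Tl]
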